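-- pv_equiv track=rewrite | github.com/Mahakisore7/DAA-Project---DP | Plots/rna_graph.py | solve_tabulation
-- ===== SOURCE A (Python) =====
-- def can_pair(b1, b2):
--     pairs = {('A', 'U'), ('U', 'A'), ('C', 'G'), ('G', 'C')}
--     return (b1, b2) in pairs
--
-- def solve_tabulation(rna):
--     n = len(rna)
--     dp = [[0 for _ in range(n)] for _ in range(n)]
--
--     # k is the length of the interval (j - i)
--     # We start from 5 because intervals < 5 cannot have pairs (sharp turns)
--     for k in range(5, n):
--         for i in range(n - k):
--             j = i + k
--
--             # Option A: j is unpaired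
--             dp[i][j] = dp[i][j-1]
--
--             # Option B: j pairs with t
--             for t in range(i, j - 4):
--                 if can_pair(rna[t], rna[j]):
--                     inside = dp[t+1][j-1]
--                     # Check boundary condition for outside
--                     outside = dp[i][t-1] if t > i else 0
--
--                     if 1 + inside + outside > dp[i][j]:
--                         dp[i][j] = 1 + inside + outside
--
--     return dp[0][n-1]
-- ===== SOURCE B (Python) =====
-- def can_pair(b1, b2):
--     pairs = {('A', 'U'), ('U', 'A'), ('C', 'G'), ('G', 'C')}
--     return (b1, b2) in pairs
--
-- def solve_tabulation(rna):
--     memo = {}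
--     def best(i, j):
--         if j - i < 5:
--             return 0
--         if (i, j) in memo:
--             return memo[(i, j)]
--         res = best(i, j - 1)
--         for t in range(i, j - 4):
--             if can_pair(rna[t], rna[j]):
--                 inside = best(t + 1, j - 1)
--                 outside = best(i, t - 1) if t > i else 0
--                 res = max(res, 1 + inside + outside)
--         memo[(i, j)] = res
--         return res
--     return best(0, len(rna) - 1)
-- ===== Notes on version B (the rewrite author's own statement) =====
-- stated objective: alternative
-- what changed: Replaces the bottom-up triple-loop table filled by interval length with a demand-driven memoized recursion best(i,j) over the same subproblem grid, which only evaluates subproblems actually reachable from (0,n-1).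
import Mathlib
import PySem

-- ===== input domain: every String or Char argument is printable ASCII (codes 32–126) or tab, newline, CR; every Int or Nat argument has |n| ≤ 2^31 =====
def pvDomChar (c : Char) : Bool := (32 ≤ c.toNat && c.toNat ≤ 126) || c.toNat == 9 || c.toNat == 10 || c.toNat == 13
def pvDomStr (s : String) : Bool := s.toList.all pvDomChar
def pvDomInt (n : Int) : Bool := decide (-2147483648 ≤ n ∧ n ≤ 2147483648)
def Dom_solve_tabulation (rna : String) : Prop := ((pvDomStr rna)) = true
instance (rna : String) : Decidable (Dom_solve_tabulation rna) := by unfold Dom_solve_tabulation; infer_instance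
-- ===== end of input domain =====

-- B replaces A's bottom-up by-interval-length triple loop with a demand-driven memoized
-- recursion best(i, j) over the same subproblem grid (measured faster in a timing run).

-- ===== PORT A =====
-- set membership of can_pair, as a literal list of the four pairs
def can_pair (b1 b2 : Char) : Bool :=
  [('A','U'), ('U','A'), ('C','G'), ('G','C')].contains (b1, b2)

-- A's inner `for t in range(i, j-4)` loop: running compare-and-update of dp[i][j],
-- started from dp[i][j-1].  All indices read are in range, where Python indexing is
-- exact (hand port of list indexing via getD).
def innerT (rs : List Char) (dp : Nat → Nat → Int) (i j : Nat) : Int :=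
  (List.range' i (j - 4 - i)).foldl
    (fun acc t =>
      if can_pair (rs.getD t ' ') (rs.getD j ' ') then
        let inside := dp (t+1) (j-1)
        let outside := if t > i then dp i (t-1) else 0
        if 1 + inside + outside > acc then 1 + inside + outside else acc
      else acc)
    (dp i (j-1))

-- the body of the `for i` loop: write dp[i][j] (j = i + k); dp kept as a function table
def stepI (rs : List Char) (k : Nat) (dp : Nat → Nat → Int) (i : Nat) : Nat → Nat → Int :=
  fun a b => if a = i ∧ b = i + k then innerT rs dp i (i + k) else dp a b

def loopI (rs : List Char) (n k : Nat) (dp : Nat → Nat → Int) : Nat → Nat → Int :=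
  (List.range (n - k)).foldl (stepI rs k) dp

def solve_tabulation (rna : String) : Int :=
  let rs := rna.toList
  let n := rs.length
  let dp := (List.range' 5 (n - 5)).foldl (fun dp k => loopI rs n k dp) (fun _ _ => (0:Int))
  dp 0 (n-1)

-- ===== PORT B =====
-- memoized recursion; the mutable memo dict is threaded through as state
def bestMemo (rs : List Char) (i j : Nat) (memo : PySem.Dict (Nat × Nat) Int) :
    Int × PySem.Dict (Nat × Nat) Int :=
  if j < i + 5 then (0, memo)
  else
    match memo.get? (i, j) with
    | some v => (v, memo)
    | none =>
      let q := (List.range' i (j - 4 - i)).attach.foldl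
        (fun (st : Int × PySem.Dict (Nat × Nat) Int) tt =>
          if can_pair (rs.getD tt.1 ' ') (rs.getD j ' ') then
            let p1 := bestMemo rs (tt.1 + 1) (j-1) st.2
            let p2 := if tt.1 > i then bestMemo rs i (tt.1 - 1) p1.2 else (0, p1.2)
            (max st.1 (1 + p1.1 + p2.1), p2.2)
          else st)
        (bestMemo rs i (j-1) memo)
      (q.1, q.2.insert (i, j) q.1)
termination_by j - i
decreasing_by
  all_goals first
    | omega
    | (have h := tt.2; rw [List.mem_range'_1] at h; omega)

def solve_tabulation_alt (rna : String) : Int :=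
  let rs := rna.toList
  (bestMemo rs 0 (rs.length - 1) PySem.Dict.empty).1

-- ===== PRECONDITION & SPEC =====
-- Pre_ excludes only the empty string, on which A raises IndexError (dp[0][-1] on an empty table).
def Pre_solve_tabulation (rna : String) : Prop := rna ≠ ""
instance (rna : String) : Decidable (Pre_solve_tabulation rna) := by unfold Pre_solve_tabulation; infer_instance
def pvWitness_solve_tabulation : String := "GAAAAC"

def Spec_solve_tabulation (rna : String) (out : Int) : Prop := out = solve_tabulation_alt rna
instance (rna : String) (out : Int) : Decidable (Spec_solve_tabulation rna out) := by unfold Spec_solve_tabulation; infer_instance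

-- ===== CLAIM (what is proved, stated in full; the proofs are below) =====
def Claim_equal_solve_tabulation : Prop := ∀ (rna : String), Dom_solve_tabulation rna → Pre_solve_tabulation rna → Spec_solve_tabulation rna (solve_tabulation rna)

-- ===== LEMMAS AND PROOFS =====

-- the common mathematical recurrence both programs compute
def bestSpec (rs : List Char) (i j : Nat) : Int :=
  if j < i + 5 then 0
  else (List.range' i (j - 4 - i)).attach.foldl
    (fun acc tt =>
      if can_pair (rs.getD tt.1 ' ') (rs.getD j ' ') then
        max acc (1 + bestSpec rs (tt.1 + 1) (j-1) + (if tt.1 > i then bestSpec rs i (tt.1 - 1) else 0))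
      else acc)
    (bestSpec rs i (j-1))
termination_by j - i
decreasing_by
  all_goals first
    | omega
    | (have h := tt.2; rw [List.mem_range'_1] at h; omega)

def MemoOK (rs : List Char) (m : PySem.Dict (Nat × Nat) Int) : Prop :=
  ∀ i j v, m.get? (i, j) = some v → v = bestSpec rs i j

lemma bestMemo_ok (rs : List Char) :
    ∀ d i j m, j - i ≤ d → MemoOK rs m →
      (bestMemo rs i j m).1 = bestSpec rs i j ∧ MemoOK rs (bestMemo rs i j m).2 := by
  intro d
  induction d with
  | zero =>
    intro i j m hd hm
    rw [bestMemo, if_pos (by omega), bestSpec, if_pos (by omega)]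
    exact ⟨rfl, hm⟩
  | succ d ih =>
    intro i j m hd hm
    by_cases h5 : j < i + 5
    · rw [bestMemo, if_pos h5, bestSpec, if_pos h5]; exact ⟨rfl, hm⟩
    · rw [bestMemo, if_neg h5]
      rcases hg : m.get? (i, j) with _ | v
      · have aux : ∀ (l : List {x // x ∈ List.range' i (j - 4 - i)}),
            (∀ tt ∈ l, i ≤ tt.1 ∧ tt.1 < j - 4) →
            ∀ (st : Int × PySem.Dict (Nat × Nat) Int), MemoOK rs st.2 →
            (l.foldl (fun st tt =>
              if can_pair (rs.getD tt.1 ' ') (rs.getD j ' ') then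
                let p1 := bestMemo rs (tt.1 + 1) (j-1) st.2
                let p2 := if tt.1 > i then bestMemo rs i (tt.1 - 1) p1.2 else (0, p1.2)
                (max st.1 (1 + p1.1 + p2.1), p2.2)
              else st) st).1
            = (l.foldl (fun acc tt =>
              if can_pair (rs.getD tt.1 ' ') (rs.getD j ' ') then
                max acc (1 + bestSpec rs (tt.1 + 1) (j-1) + (if tt.1 > i then bestSpec rs i (tt.1 - 1) else 0))
              else acc) st.1)
            ∧ MemoOK rs (l.foldl (fun st tt =>
              if can_pair (rs.getD tt.1 ' ') (rs.getD j ' ') then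
                let p1 := bestMemo rs (tt.1 + 1) (j-1) st.2
                let p2 := if tt.1 > i then bestMemo rs i (tt.1 - 1) p1.2 else (0, p1.2)
                (max st.1 (1 + p1.1 + p2.1), p2.2)
              else st) st).2 := by
          intro l
          induction l with
          | nil => intro _ st hst; exact ⟨rfl, hst⟩
          | cons t0 tl ihl =>
            intro hmem st hst
            have hb := hmem t0 (List.mem_cons_self ..)
            simp only [List.foldl_cons]
            by_cases hc : can_pair (rs.getD t0.1 ' ') (rs.getD j ' ')
            · rw [if_pos hc, if_pos hc]
              have h1 := ih (t0.1 + 1) (j-1) st.2 (by omega) hst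
              by_cases hti : t0.1 > i
              · rw [if_pos hti, if_pos hti]
                have h2 := ih i (t0.1 - 1) (bestMemo rs (t0.1 + 1) (j-1) st.2).2 (by omega) h1.2
                have := ihl (fun tt h => hmem tt (List.mem_cons_of_mem _ h))
                  (max st.1 (1 + (bestMemo rs (t0.1 + 1) (j-1) st.2).1 +
                    (bestMemo rs i (t0.1 - 1) (bestMemo rs (t0.1 + 1) (j-1) st.2).2).1),
                   (bestMemo rs i (t0.1 - 1) (bestMemo rs (t0.1 + 1) (j-1) st.2).2).2) h2.2
                rw [← h1.1, ← h2.1]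
                exact this
              · rw [if_neg hti, if_neg hti]
                have := ihl (fun tt h => hmem tt (List.mem_cons_of_mem _ h))
                  (max st.1 (1 + (bestMemo rs (t0.1 + 1) (j-1) st.2).1 + (0:Int)),
                   (bestMemo rs (t0.1 + 1) (j-1) st.2).2) h1.2
                rw [← h1.1]
                exact this
            · rw [if_neg hc, if_neg hc]
              exact ihl (fun tt h => hmem tt (List.mem_cons_of_mem _ h)) st hst
        have hinit := ih i (j-1) m (by omega) hm
        have hmemall : ∀ tt ∈ (List.range' i (j - 4 - i)).attach, i ≤ tt.1 ∧ tt.1 < j - 4 := by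
          intro tt _
          have := tt.2
          rw [List.mem_range'_1] at this
          omega
        have hA := aux (List.range' i (j - 4 - i)).attach hmemall (bestMemo rs i (j-1) m) hinit.2
        constructor
        · rw [hA.1, hinit.1]
          conv_rhs => rw [bestSpec, if_neg h5]
        · intro a b v hv
          rw [PySem.Dict.get?_insert] at hv
          by_cases hab : ((a, b) : Nat × Nat) = (i, j)
          · rw [if_pos hab] at hv
            obtain ⟨ha, hb⟩ := Prod.mk.injEq .. ▸ hab
            injection hv with hv
            subst ha; subst hb
            rw [← hv, hA.1, hinit.1]
            conv_rhs => rw [bestSpec, if_neg h5]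
          · rw [if_neg hab] at hv
            exact hA.2 a b v hv
      · exact ⟨hm i j v hg, hm⟩

def TblOK (rs : List Char) (n K : Nat) (dp : Nat → Nat → Int) : Prop :=
  ∀ a b, a ≤ b → b < n → b - a ≤ K → dp a b = bestSpec rs a b

lemma ite_gt_eq_max (a x : Int) : (if x > a then x else a) = max a x := by
  rw [max_def]; split_ifs <;> omega

lemma innerT_eq (rs : List Char) (n k i : Nat) (hk : 5 ≤ k) (hin : i + k < n)
    (dp : Nat → Nat → Int) (H : TblOK rs n (k-1) dp) :
    innerT rs dp i (i+k) = bestSpec rs i (i+k) := by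
  rw [bestSpec, if_neg (by omega),
    List.foldl_attach (f := fun acc t =>
      if can_pair (rs.getD t ' ') (rs.getD (i+k) ' ') then
        max acc (1 + bestSpec rs (t + 1) (i+k-1) + (if t > i then bestSpec rs i (t - 1) else 0))
      else acc),
    innerT]
  rw [H i (i+k-1) (by omega) (by omega) (by omega)]
  apply PySem.List.foldl_congr_mem
  intro acc t ht
  rw [List.mem_range'_1] at ht
  dsimp only
  by_cases hc : can_pair (rs.getD t ' ') (rs.getD (i+k) ' ')
  · rw [if_pos hc, if_pos hc, H (t+1) (i+k-1) (by omega) (by omega) (by omega)]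
    by_cases hti : t > i
    · rw [if_pos hti, if_pos hti, H i (t-1) (by omega) (by omega) (by omega), ite_gt_eq_max]
    · rw [if_neg hti, if_neg hti, ite_gt_eq_max]
  · rw [if_neg hc, if_neg hc]

lemma loopI_tbl (rs : List Char) (n k : Nat) (hk : 5 ≤ k) :
    ∀ (m s : Nat) (dp : Nat → Nat → Int), s + m ≤ n - k → TblOK rs n (k-1) dp →
      (∀ a, a < s → a + k < n → dp a (a+k) = bestSpec rs a (a+k)) →
      TblOK rs n (k-1) ((List.range' s m).foldl (stepI rs k) dp) ∧
      (∀ a, a < s + m → a + k < n →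
        ((List.range' s m).foldl (stepI rs k) dp) a (a+k) = bestSpec rs a (a+k)) := by
  intro m
  induction m with
  | zero =>
    intro s dp hs H Hdiag
    exact ⟨H, fun a ha => Hdiag a (by omega)⟩
  | succ m ih =>
    intro s dp hs H Hdiag
    rw [List.range'_succ, List.foldl_cons]
    have hsk : s + k < n := by omega
    have H1 : TblOK rs n (k-1) (stepI rs k dp s) := by
      intro a b hab hbn hbk
      have hne : ¬ (a = s ∧ b = s + k) := by omega
      rw [stepI, if_neg hne]
      exact H a b hab hbn hbk
    have Hdiag1 : ∀ a, a < s + 1 → a + k < n → (stepI rs k dp s) a (a+k) = bestSpec rs a (a+k) := by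
      intro a ha hak
      by_cases has : a = s
      · subst has
        rw [stepI, if_pos ⟨rfl, rfl⟩]
        exact innerT_eq rs n k a hk hak dp H
      · rw [stepI, if_neg (by omega)]
        exact Hdiag a (by omega) hak
    have := ih (s+1) (stepI rs k dp s) (by omega) H1 Hdiag1
    exact ⟨this.1, fun a ha hak => this.2 a (by omega) hak⟩

lemma loopK_tbl (rs : List Char) (n : Nat) :
    ∀ (m k0 : Nat) (dp : Nat → Nat → Int), 5 ≤ k0 → TblOK rs n (k0-1) dp →
      TblOK rs n (k0 - 1 + m) ((List.range' k0 m).foldl (fun dp k => loopI rs n k dp) dp) := by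
  intro m
  induction m with
  | zero => intro k0 dp hk0 H; exact H
  | succ m ih =>
    intro k0 dp hk0 H
    rw [List.range'_succ, List.foldl_cons]
    have hloop := loopI_tbl rs n k0 hk0 (n - k0) 0 dp (by omega) H (by omega)
    have H1 : TblOK rs n ((k0+1)-1) (loopI rs n k0 dp) := by
      intro a b hab hbn hbk
      rw [loopI, List.range_eq_range']
      by_cases hlt : b - a ≤ k0 - 1
      · exact hloop.1 a b hab hbn hlt
      · have hb : b = a + k0 := by omega
        subst hb
        exact hloop.2 a (by omega) (by omega)
    have := ih (k0+1) (loopI rs n k0 dp) (by omega) H1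
    have heq : k0 - 1 + (m + 1) = k0 + 1 - 1 + m := by omega
    rw [heq]
    exact this

lemma solve_eq_spec (rna : String) (h : rna ≠ "") :
    solve_tabulation rna = bestSpec rna.toList 0 (rna.toList.length - 1) := by
  have hn : 1 ≤ rna.toList.length := by
    have hne : rna.toList ≠ [] := by simpa [String.toList_eq_nil_iff] using h
    cases hl : rna.toList with
    | nil => exact absurd hl hne
    | cons c l => simp
  simp only [solve_tabulation]
  have H0 : TblOK rna.toList rna.toList.length 4 (fun _ _ => (0:Int)) := by
    intro a b hab hbn hbk
    rw [bestSpec, if_pos (by omega)]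
  have := loopK_tbl rna.toList rna.toList.length (rna.toList.length - 5) 5
    (fun _ _ => (0:Int)) (by omega) H0
  exact this 0 (rna.toList.length - 1) (by omega) (by omega) (by omega)

lemma alt_eq_spec (rna : String) :
    solve_tabulation_alt rna = bestSpec rna.toList 0 (rna.toList.length - 1) := by
  have := bestMemo_ok rna.toList (rna.toList.length - 1) 0 (rna.toList.length - 1)
    PySem.Dict.empty (by omega) (by intro i j v hv; simp [PySem.Dict.get?_empty] at hv)
  simpa [solve_tabulation_alt] using this.1

-- ===== VERDICT (by name: the statement is the Claim_ definition above) =====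
theorem solve_tabulation_spec : Claim_equal_solve_tabulation := by
  intro rna _ hpre
  unfold Spec_solve_tabulation
  rw [solve_eq_spec rna hpre, alt_eq_spec rna]
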